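-- pv_equiv track=rewrite | github.com/zeropointdynamics/passtell | CCS_23/rich_header/passtell/passtell_decomposition.py | _merge_connected_subgroups
-- ===== SOURCE A (Python) =====
-- def _merge_connected_subgroups(groups: dict):
--     changed = True
--     merged_heads = []
--     while changed:
--         changed = False
--         for group_a in groups:
--             for func_a in group_a[1:]:
--                 for group_b in groups:
--                     if group_b[0] == func_a:
--                         for func_b in group_b:
--                             if not func_b in group_a:
--                                 group_a.append(func_b)
--                                 if not func_b in merged_heads:
--                                     merged_heads.append(func_b)
--                                 changed = True
--     groups_stripped = []
--     for group in groups: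
--         if not group[0] in merged_heads:
--             groups_stripped.append(group)
--     return groups_stripped
-- ===== SOURCE B (Python) =====
-- def _merge_connected_subgroups(groups: dict):
--     # Semi-naive (delta/worklist) evaluation of the same merge fixpoint:
--     # a head->group-indices index replaces the scan for matching heads, a
--     # per-(target,source) cursor transfers each source element at most once
--     # per pair (A rescans whole source groups every pass), and a reverse
--     # reference index drives a dirty worklist so a group is revisited only
--     # when it grew or one of its source groups grew (A revisits everything).
--     # Mutates the inner lists in place exactly as A does.
--     n = len(groups)
--     head_idx = {}
--     for j in range(n):
--         head_idx.setdefault(groups[j][0], []).append(j)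
--     members = [set(g) for g in groups]
--     merged = set()
--     cur = {}                      # (target, source) -> elements already pulled
--     refs = {}                     # value -> targets whose tail contains it
--     for i in range(n):
--         for v in groups[i][1:]:
--             refs.setdefault(v, set()).add(i)
--     dirty = set(range(n))
--     while dirty:
--         for i in range(n):
--             if i not in dirty:
--                 continue
--             dirty.discard(i)
--             limit = len(groups[i])          # snapshot, as A's group_a[1:]
--             for k in range(1, limit):
--                 for j in head_idx.get(groups[i][k], ()):
--                     c = cur.get((i, j), 0)
--                     src = groups[j]
--                     while c < len(src):
--                         x = src[c]
--                         c += 1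
--                         if x not in members[i]:
--                             groups[i].append(x)
--                             members[i].add(x)
--                             merged.add(x)
--                             refs.setdefault(x, set()).add(i)
--                             dirty.add(i)
--                             for t in refs.get(groups[i][0], ()):
--                                 dirty.add(t)
--                     cur[(i, j)] = c
--     return [g for g in groups if g[0] not in merged]
-- ===== Notes on version B (the rewrite author's own statement) =====
-- stated objective: faster
-- what changed: B evaluates the same merge fixpoint semi-naively: a head-to-group-indices index built once replaces the scan over all groups, per-(target,source) cursors transfer each source element at most once per pair instead of rescanning whole source groups every pass, and a reverse-reference index drives a dirty worklist so a group is revisited only when it grew or one of its source groups grew, while A blindly re-runs full passes over everything until nothing changes.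
import Mathlib
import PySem

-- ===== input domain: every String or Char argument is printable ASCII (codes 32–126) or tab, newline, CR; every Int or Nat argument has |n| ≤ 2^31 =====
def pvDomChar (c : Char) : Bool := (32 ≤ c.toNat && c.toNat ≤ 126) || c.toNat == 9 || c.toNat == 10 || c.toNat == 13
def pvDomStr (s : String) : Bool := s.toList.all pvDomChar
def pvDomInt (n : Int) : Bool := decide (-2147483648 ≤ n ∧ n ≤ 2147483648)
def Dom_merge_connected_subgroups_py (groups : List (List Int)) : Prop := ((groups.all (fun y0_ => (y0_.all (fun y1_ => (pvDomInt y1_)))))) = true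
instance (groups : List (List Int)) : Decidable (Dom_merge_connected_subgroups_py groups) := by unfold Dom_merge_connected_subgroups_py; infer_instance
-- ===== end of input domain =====

-- B replaces A's repeat-everything passes by semi-naive (delta/worklist) evaluation:
-- a head→group-indices index, per-(target,source) cursors so each source element is
-- pulled at most once per pair, and a reverse-reference index driving a dirty
-- worklist so untouched groups are skipped; the append schedule is identical.
-- Both A and B mutate the inner lists of `groups` in place identically (same
-- appends, same order); the equivalence proved here is about the RETURN value.

-- ===== PORT A =====
-- state: (groups, merged_heads, changed)
def pvA_fb (i : Nat) (st : List (List Int) × List Int × Bool) (fb : Int) :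
    List (List Int) × List Int × Bool :=
  let gi := st.1.getD i []
  if fb ∈ gi then st
  else (st.1.set i (gi ++ [fb]),
        (if fb ∈ st.2.1 then st.2.1 else st.2.1 ++ [fb]),
        true)

-- 'for group_b in groups: if group_b[0] == func_a: for func_b in group_b: …'
def pvA_fa (n i : Nat) (st : List (List Int) × List Int × Bool) (fa : Int) :
    List (List Int) × List Int × Bool :=
  (List.range n).foldl (fun s j =>
    let gb := s.1.getD j []
    if gb.headD 0 = fa then gb.foldl (pvA_fb i) s else s) st

-- 'for func_a in group_a[1:]: …'  (the slice is taken once, at loop entry)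
def pvA_group (n : Nat) (st : List (List Int) × List Int × Bool) (i : Nat) :
    List (List Int) × List Int × Bool :=
  ((st.1.getD i []).drop 1).foldl (pvA_fa n i) st

def pvA_pass (n : Nat) (gs : List (List Int)) (mh : List Int) :
    List (List Int) × List Int × Bool :=
  (List.range n).foldl (pvA_group n) (gs, mh, false)

-- 'while changed:' — fuel bounds the number of passes; each pass that sets changed
-- appends at least one element new to its group, so n * |flatten groups| + 1 passes suffice.
def pvA_loop (n : Nat) : Nat → List (List Int) → List Int → List (List Int) × List Int
  | 0, gs, mh => (gs, mh)
  | fuel+1, gs, mh =>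
    let st := pvA_pass n gs mh
    if st.2.2 then pvA_loop n fuel st.1 st.2.1 else (st.1, st.2.1)

def merge_connected_subgroups_py (groups : List (List Int)) : List (List Int) :=
  let n := groups.length
  let r := pvA_loop n (n * groups.flatten.length + 1) groups []
  r.1.foldl (fun acc g => if ¬ (g.headD 0 ∈ r.2) then acc ++ [g] else acc) []

-- ===== PORT B =====
-- B's state: groups, per-group membership sets, merged set, per-(target,source)
-- cursors, reverse reference index (value → targets whose tail contains it),
-- and the dirty worklist.
structure PvBSt where
  gs : List (List Int)
  ms : List (PySem.Set Int)
  mg : PySem.Set Int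
  cur : PySem.Dict (Nat × Nat) Nat
  refs : PySem.Dict Int (PySem.Set Nat)
  dirty : PySem.Set Nat

-- head_idx: head value → list of indices of the groups having that head, in order
def pvB_idx (groups : List (List Int)) : PySem.Dict Int (List Nat) :=
  (List.range groups.length).foldl
    (fun d j => d.modify ((groups.getD j []).headD 0) [] (· ++ [j])) PySem.Dict.empty

-- refs init: 'for i in range(n): for v in groups[i][1:]: refs.setdefault(v, set()).add(i)'
def pvB_refs0 (groups : List (List Int)) : PySem.Dict Int (PySem.Set Nat) :=
  (List.range groups.length).foldl
    (fun d i => ((groups.getD i []).drop 1).foldl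
      (fun d v => d.modify v [] (fun s => PySem.Set.add s i)) d)
    PySem.Dict.empty

-- the append block: extend group i, its member set, merged, refs, and mark dirty
-- (i itself, and every target referencing head(groups[i]) via the refs index)
def pvB_append (i : Nat) (x : Int) (st : PvBSt) : PvBSt :=
  let gi := st.gs.getD i []
  let refs' := st.refs.modify x [] (fun s => PySem.Set.add s i)
  { gs := st.gs.set i (gi ++ [x]),
    ms := st.ms.set i (PySem.Set.add (st.ms.getD i []) x),
    mg := PySem.Set.add st.mg x,
    cur := st.cur,
    refs := refs',
    -- groups[i][0] is unchanged by the append (index 0)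
    dirty := PySem.Set.update (PySem.Set.add st.dirty i) (refs'.getD (gi.headD 0) []) }

-- 'while c < len(src): …' — fuel = remaining length of the source at entry; exact,
-- because the source list cannot grow during the pull (members[i] always contains
-- every element of groups[i], so a self-source never appends).
def pvB_pull (i j : Nat) : Nat → PvBSt → Nat → PvBSt × Nat
  | 0, st, c => (st, c)
  | F+1, st, c =>
    let src := st.gs.getD j []
    if c < src.length then
      let x := src.getD c 0
      let st' := if x ∈ st.ms.getD i [] then st else pvB_append i x st
      pvB_pull i j F st' (c+1)
    else (st, c)

-- one (target, source) pair: pull the delta, then store the cursor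
def pvB_edge (i : Nat) (st : PvBSt) (j : Nat) : PvBSt :=
  let c := st.cur.getD (i, j) 0
  let r := pvB_pull i j ((st.gs.getD j []).length - c) st c
  { r.1 with cur := r.1.cur.insert (i, j) r.2 }

-- one scanned position k of group i: look up the sources headed by groups[i][k]
def pvB_pos (hidx : PySem.Dict Int (List Nat)) (i : Nat) (st : PvBSt) (k : Nat) : PvBSt :=
  (hidx.getD ((st.gs.getD i []).getD k 0) []).foldl (pvB_edge i) st

-- process one dirty group: discard it from the worklist, then scan positions
-- 1..limit-1 (limit = its length at entry, as Python's range(1, limit))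
def pvB_proc (hidx : PySem.Dict Int (List Nat)) (st : PvBSt) (i : Nat) : PvBSt :=
  ((List.range ((st.gs.getD i []).length)).drop 1).foldl (pvB_pos hidx i)
    { st with dirty := PySem.Set.discard st.dirty i }

-- 'for i in range(n): if i not in dirty: continue; …'
def pvB_sweep (hidx : PySem.Dict Int (List Nat)) (n : Nat) (st : PvBSt) : PvBSt :=
  (List.range n).foldl (fun s i => if i ∈ s.dirty then pvB_proc hidx s i else s) st

-- 'while dirty:' — same fuel bound as A's pass loop (each sweep that leaves the
-- worklist non-empty performed at least one append)
def pvB_loop (hidx : PySem.Dict Int (List Nat)) (n : Nat) : Nat → PvBSt → PvBSt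
  | 0, st => st
  | F+1, st => if st.dirty.isEmpty then st else pvB_loop hidx n F (pvB_sweep hidx n st)

def merge_connected_subgroups_py_alt (groups : List (List Int)) : List (List Int) :=
  let n := groups.length
  let hidx := pvB_idx groups
  let st0 : PvBSt :=
    { gs := groups, ms := groups.map PySem.Set.ofList, mg := PySem.Set.empty,
      cur := PySem.Dict.empty, refs := pvB_refs0 groups,
      dirty := PySem.Set.ofList (List.range n) }
  let r := pvB_loop hidx n (n * groups.flatten.length + 1) st0
  r.gs.filter (fun g => !decide (g.headD 0 ∈ r.mg))

-- ===== PRECONDITION & SPEC =====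
-- Pre_ excludes exactly the inputs on which A raises: any empty group makes
-- Python's group[0] / group_b[0] an IndexError (B raises there too).
def Pre_merge_connected_subgroups_py (groups : List (List Int)) : Prop :=
  ∀ g ∈ groups, g ≠ []
instance (groups : List (List Int)) : Decidable (Pre_merge_connected_subgroups_py groups) := by
  unfold Pre_merge_connected_subgroups_py; infer_instance

def pvWitness_merge_connected_subgroups_py : List (List Int) := [[1, 2], [2, 3]]

def Spec_merge_connected_subgroups_py (groups : List (List Int)) (out : List (List Int)) : Prop := out = merge_connected_subgroups_py_alt groups
instance (groups : List (List Int)) (out : List (List Int)) : Decidable (Spec_merge_connected_subgroups_py groups out) := by unfold Spec_merge_connected_subgroups_py; infer_instance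

-- ===== CLAIM (what is proved, stated in full; the proofs are below) =====
def Claim_equal_merge_connected_subgroups_py : Prop := ∀ (groups : List (List Int)), Dom_merge_connected_subgroups_py groups → Pre_merge_connected_subgroups_py groups → Spec_merge_connected_subgroups_py groups (merge_connected_subgroups_py groups)

-- ===== LEMMAS AND PROOFS =====

-- run-time invariant of the group list relative to the input
def pvHeads (groups gs : List (List Int)) : Prop :=
  gs.length = groups.length ∧
    ∀ j : Nat, j < gs.length →
      gs.getD j [] ≠ [] ∧ (gs.getD j []).headD 0 = (groups.getD j []).headD 0

-- coupling of B's membership sets with A's group lists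
def pvMem (ms : List (PySem.Set Int)) (gs : List (List Int)) : Prop :=
  ms.length = gs.length ∧ ∀ (j : Nat) (x : Int), x ∈ ms.getD j [] ↔ x ∈ gs.getD j []

-- cursor invariant: every cursor is in range and the pulled prefix of the
-- source already lies in the target group
def pvCurInv (st : PvBSt) : Prop :=
  ∀ i j : Nat, st.cur.getD (i, j) 0 ≤ (st.gs.getD j []).length ∧
    ∀ t, t < st.cur.getD (i, j) 0 → (st.gs.getD j []).getD t 0 ∈ st.gs.getD i []

-- refs completeness: every tail value of a group is registered in refs
def pvRefsInv (st : PvBSt) : Prop :=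
  ∀ i, i < st.gs.length → ∀ v ∈ (st.gs.getD i []).drop 1, i ∈ st.refs.getD v []

def pvRefsRange (st : PvBSt) : Prop :=
  ∀ (v : Int), ∀ t ∈ st.refs.getD v [], t < st.gs.length

def pvDirtyRange (st : PvBSt) : Prop :=
  ∀ t ∈ st.dirty, t < st.gs.length

-- a group not on the worklist has all its relevant cursors exhausted
def pvClean (st : PvBSt) (t : Nat) : Prop :=
  t ∉ st.dirty → ∀ k, 1 ≤ k → k < (st.gs.getD t []).length → ∀ j, j < st.gs.length →
    (st.gs.getD j []).headD 0 = (st.gs.getD t []).getD k 0 →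
    st.cur.getD (t, j) 0 = (st.gs.getD j []).length

def pvCE (st : PvBSt) (i : Nat) : Prop := ∀ t, t ≠ i → pvClean st t

def pvCleanAll (st : PvBSt) : Prop := ∀ t, pvClean st t

-- full coupling between an A-state and a B-state
def pvRC (groups : List (List Int)) (a : List (List Int) × List Int × Bool) (st : PvBSt) : Prop :=
  st.gs = a.1 ∧ st.mg = a.2.1 ∧ pvMem st.ms a.1 ∧ pvHeads groups a.1 ∧
  pvCurInv st ∧ pvRefsInv st ∧ pvRefsRange st ∧ pvDirtyRange st

-- composable summary of what one coupled step (while processing group i) can do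
def pvPost (i : Nat) (a a' : List (List Int) × List Int × Bool) (st st' : PvBSt) : Prop :=
  (∀ j', j' ≠ i → st'.gs.getD j' [] = st.gs.getD j' []) ∧
  (∃ e, st'.gs.getD i [] = st.gs.getD i [] ++ e) ∧
  (∀ t, t ∈ st.dirty → t ∈ st'.dirty) ∧
  (a.2.2 = true → a'.2.2 = true) ∧
  (∀ j : Nat, st'.cur.getD (i, j) 0 = st.cur.getD (i, j) 0 ∨
    st'.cur.getD (i, j) 0 = (st'.gs.getD j []).length ∨ i ∈ st'.dirty) ∧
  ((st'.gs = st.gs ∧ st'.ms = st.ms ∧ st'.mg = st.mg ∧ st'.refs = st.refs ∧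
      st'.dirty = st.dirty ∧ a' = a) ∨
    (a'.2.2 = true ∧ i ∈ st'.dirty))

lemma pvPost_refl (i : Nat) (a : List (List Int) × List Int × Bool) (st : PvBSt) :
    pvPost i a a st st := by
  refine ⟨fun _ _ => rfl, ⟨[], by simp⟩, fun _ h => h, fun h => h,
    fun _ => Or.inl rfl, Or.inl ⟨rfl, rfl, rfl, rfl, rfl, rfl⟩⟩

lemma pvPost_trans {i : Nat} {a a' a'' : List (List Int) × List Int × Bool}
    {st st' st'' : PvBSt} (h1 : pvPost i a a' st st') (h2 : pvPost i a' a'' st' st'') :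
    pvPost i a a'' st st'' := by
  obtain ⟨s1, e1, d1, f1, c1, n1⟩ := h1
  obtain ⟨s2, e2, d2, f2, c2, n2⟩ := h2
  refine ⟨fun j' hj => (s2 j' hj).trans (s1 j' hj), ?_, fun t ht => d2 _ (d1 _ ht),
    fun hf => f2 (f1 hf), ?_, ?_⟩
  · obtain ⟨e, he⟩ := e1; obtain ⟨e', he'⟩ := e2
    exact ⟨e ++ e', by rw [he', he, List.append_assoc]⟩
  · intro j
    rcases c2 j with h | h | h
    · rw [h]
      rcases c1 j with g | g | g
      · exact Or.inl g
      · rcases n2 with ⟨hgs, _⟩ | ⟨_, hd⟩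
        · exact Or.inr (Or.inl (by rw [g, hgs]))
        · exact Or.inr (Or.inr hd)
      · exact Or.inr (Or.inr (d2 _ g))
    · exact Or.inr (Or.inl h)
    · exact Or.inr (Or.inr h)
  · rcases n1 with ⟨a1, b1, c1', d1', e1', g1⟩ | ⟨hf, hd⟩
    · rcases n2 with ⟨a2, b2, c2', d2', e2', g2⟩ | ⟨hf2, hd2⟩
      · exact Or.inl ⟨a2.trans a1, b2.trans b1, c2'.trans c1', d2'.trans d1',
          e2'.trans e1', g2.trans g1⟩
      · exact Or.inr ⟨hf2, hd2⟩
    · rcases n2 with ⟨a2, b2, c2', d2', e2', g2⟩ | ⟨hf2, hd2⟩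
      · exact Or.inr ⟨g2 ▸ hf, e2' ▸ hd⟩
      · exact Or.inr ⟨hf2, hd2⟩

lemma pvFull_persist {i j : Nat} {a a' : List (List Int) × List Int × Bool}
    {st st' : PvBSt} (h : pvPost i a a' st st')
    (hf : i ∈ st.dirty ∨ st.cur.getD (i, j) 0 = (st.gs.getD j []).length) :
    i ∈ st'.dirty ∨ st'.cur.getD (i, j) 0 = (st'.gs.getD j []).length := by
  obtain ⟨s, e, d, f, c, n⟩ := h
  rcases hf with hd | hfull
  · exact Or.inl (d _ hd)
  · rcases n with ⟨hgs, _, _, _, hdy, _⟩ | ⟨_, hd⟩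
    · rcases c j with h1 | h1 | h1
      · exact Or.inr (by rw [h1, hfull, hgs])
      · exact Or.inr h1
      · exact Or.inl h1
    · exact Or.inl hd

lemma pvGetD_set_self {α : Type} (l : List α) (i : Nat) (v d : α) (h : i < l.length) :
    (l.set i v).getD i d = v := by
  simp [List.getD_eq_getElem?_getD, h]

lemma pvGetD_set_ne {α : Type} (l : List α) (i j : Nat) (v d : α) (h : j ≠ i) :
    (l.set i v).getD j d = l.getD j d := by
  simp [List.getD_eq_getElem?_getD, h.symm]

lemma pvGetD_append_left {α : Type} (l e : List α) (k : Nat) (d : α) (h : k < l.length) :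
    (l ++ e).getD k d = l.getD k d := by
  simp [List.getD_eq_getElem?_getD, List.getElem?_append_left h]

lemma pvGetD_mem {α : Type} (l : List α) (k : Nat) (d : α) (h : k < l.length) :
    l.getD k d ∈ l := by
  rw [List.getD_eq_getElem _ _ h]; exact List.getElem_mem h

lemma pvGetD_mem_drop_one (l : List Int) (k : Nat) (h1 : 1 ≤ k) (h2 : k < l.length) :
    l.getD k 0 ∈ l.drop 1 := by
  rw [List.getD_eq_getElem _ _ h2]
  have h3 : k - 1 < (l.drop 1).length := by simp; omega
  have h4 : l[k] = (l.drop 1)[k - 1]'h3 := by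
    rw [List.getElem_drop]; congr 1; omega
  rw [h4]
  exact List.getElem_mem h3

lemma pvHeads_headD {groups gs : List (List Int)} (h : pvHeads groups gs) (j : Nat) :
    (gs.getD j []).headD 0 = (groups.getD j []).headD 0 := by
  obtain ⟨hl, h2⟩ := h
  by_cases hj : j < gs.length
  · exact (h2 j hj).2
  · rw [List.getD_eq_default _ _ (le_of_not_gt hj),
      List.getD_eq_default _ _ (by omega : groups.length ≤ j)]

lemma pvHeadD_append {g : List Int} (h : g ≠ []) (x d : Int) :
    (g ++ [x]).headD d = g.headD d := by
  cases g with
  | nil => exact absurd rfl h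
  | cons a t => rfl

lemma pvFoldl_id {α β : Type} (f : β → α → β) (a : β) (l : List α)
    (h : ∀ x ∈ l, f a x = a) : l.foldl f a = a := by
  induction l with
  | nil => rfl
  | cons x t ih => rw [List.foldl_cons, h x (by simp)]; exact ih (fun y hy => h y (by simp [hy]))

lemma pvA_foldl_fb_id (i : Nat) :
    ∀ (l : List Int) (a : List (List Int) × List Int × Bool),
      (∀ x ∈ l, x ∈ a.1.getD i []) → l.foldl (pvA_fb i) a = a := by
  intro l
  induction l with
  | nil => intro a _; rfl
  | cons x t ih =>
    intro a hx
    have h1 : pvA_fb i a x = a := by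
      simp only [pvA_fb]
      rw [if_pos (hx x (by simp))]
    rw [List.foldl_cons, h1]
    exact ih a (fun y hy => hx y (by simp [hy]))

lemma pvB_idx_getD (groups : List (List Int)) (fa : Int) :
    (pvB_idx groups).getD fa [] =
      (List.range groups.length).filter (fun j => (groups.getD j []).headD 0 == fa) := by
  unfold pvB_idx
  rw [← List.foldl_map (f := fun j : Nat => ((groups.getD j []).headD 0, j))
      (g := fun (d : PySem.Dict Int (List Nat)) (p : Int × Nat) => d.modify p.1 [] (· ++ [p.2]))]
  rw [PySem.Dict.getD_foldl_modify_append]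
  simp [List.filter_map, Function.comp_def]

-- the tail of a list as reads of positions 1..len-1
lemma pvDrop_one_eq_map (l : List Int) :
    l.drop 1 = ((List.range l.length).drop 1).map (fun k => l.getD k 0) := by
  apply List.ext_getElem
  · simp
  · intro i h1 h2
    simp only [List.getElem_drop, List.getElem_map, List.getElem_range]
    have hi : 1 + i < l.length := by
      have := h1; simp at this; omega
    rw [List.getD_eq_getElem _ _ hi]

-- ===== the step lemmas =====
lemma pvRefs_mono (d : PySem.Dict Int (PySem.Set Nat)) (x : Int) (i : Nat)
    (v : Int) (t : Nat) (ht : t ∈ d.getD v []) :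
    t ∈ (d.modify x [] (fun s => PySem.Set.add s i)).getD v [] := by
  rw [PySem.Dict.getD_modify]
  split_ifs with hv
  · subst hv; exact (PySem.Set.mem_add _ _ _).mpr (Or.inl ht)
  · exact ht

lemma pvRefs_self (d : PySem.Dict Int (PySem.Set Nat)) (x : Int) (i : Nat) :
    i ∈ (d.modify x [] (fun s => PySem.Set.add s i)).getD x [] := by
  rw [PySem.Dict.getD_modify_self]
  exact (PySem.Set.mem_add _ _ _).mpr (Or.inr rfl)

lemma pvRefs_range (d : PySem.Dict Int (PySem.Set Nat)) (x : Int) (i : Nat)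
    (v : Int) (t : Nat) (ht : t ∈ (d.modify x [] (fun s => PySem.Set.add s i)).getD v []) :
    t ∈ d.getD v [] ∨ t = i := by
  rw [PySem.Dict.getD_modify] at ht
  split_ifs at ht with hv
  · rcases (PySem.Set.mem_add _ _ _).mp ht with h | h
    · exact Or.inl (hv ▸ h)
    · exact Or.inr h
  · exact Or.inl ht


lemma pv_fb (groups : List (List Int)) (i : Nat) (hi : i < groups.length) (x : Int)
    (a : List (List Int) × List Int × Bool) (st : PvBSt)
    (h : pvRC groups a st) (hce : pvCE st i) :
    pvRC groups (pvA_fb i a x) (if x ∈ st.ms.getD i [] then st else pvB_append i x st) ∧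
    pvCE (if x ∈ st.ms.getD i [] then st else pvB_append i x st) i ∧
    pvPost i a (pvA_fb i a x) st (if x ∈ st.ms.getD i [] then st else pvB_append i x st) := by
  obtain ⟨hgs, hmg, ⟨hml, hmm⟩, hhd, hcur, hrefs, hrr, hdr⟩ := h
  have hlen : a.1.length = groups.length := hhd.1
  have hilen : i < a.1.length := by omega
  have hne : a.1.getD i [] ≠ [] := (hhd.2 i hilen).1
  by_cases hx : x ∈ st.ms.getD i []
  · rw [if_pos hx]
    have hA : pvA_fb i a x = a := by
      simp only [pvA_fb]; rw [if_pos ((hmm i x).mp hx)]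
    rw [hA]
    exact ⟨⟨hgs, hmg, ⟨hml, hmm⟩, hhd, hcur, hrefs, hrr, hdr⟩, hce, pvPost_refl i a st⟩
  · rw [if_neg hx]
    have hxa : x ∉ a.1.getD i [] := fun hc => hx ((hmm i x).mpr hc)
    have hA : pvA_fb i a x =
        (a.1.set i (a.1.getD i [] ++ [x]),
         (if x ∈ a.2.1 then a.2.1 else a.2.1 ++ [x]), true) := by
      simp only [pvA_fb]; rw [if_neg hxa]
    set refs' := st.refs.modify x [] (fun s => PySem.Set.add s i) with hrefs'
    have e1 : (pvB_append i x st).gs = st.gs.set i (st.gs.getD i [] ++ [x]) := rfl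
    have e2 : (pvB_append i x st).ms =
        st.ms.set i (PySem.Set.add (st.ms.getD i []) x) := rfl
    have e3 : (pvB_append i x st).mg = PySem.Set.add st.mg x := rfl
    have e4 : (pvB_append i x st).cur = st.cur := rfl
    have e5 : (pvB_append i x st).refs = refs' := rfl
    have e6 : (pvB_append i x st).dirty =
        PySem.Set.update (PySem.Set.add st.dirty i)
          (refs'.getD ((st.gs.getD i []).headD 0) []) := rfl
    have hdm : ∀ t, t ∈ st.dirty → t ∈ (pvB_append i x st).dirty := by
      intro t ht
      rw [e6]
      exact (PySem.Set.mem_update _ _ _).mpr (Or.inl ((PySem.Set.mem_add _ _ _).mpr (Or.inl ht)))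
    have hdi : i ∈ (pvB_append i x st).dirty := by
      rw [e6]
      exact (PySem.Set.mem_update _ _ _).mpr (Or.inl ((PySem.Set.mem_add _ _ _).mpr (Or.inr rfl)))
    have hglen : (pvB_append i x st).gs.length = st.gs.length := by
      rw [e1]; simp
    have hgetd : ∀ j' : Nat, j' ≠ i →
        (pvB_append i x st).gs.getD j' [] = st.gs.getD j' [] := by
      intro j' hj'
      rw [e1]; exact pvGetD_set_ne _ _ _ _ _ hj'
    have hgeti : (pvB_append i x st).gs.getD i [] = st.gs.getD i [] ++ [x] := by
      rw [e1]; exact pvGetD_set_self _ _ _ _ (by rw [hgs]; exact hilen)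
    -- membership in a (possibly i-extended) group, from membership in the old one
    have hmono : ∀ (j' : Nat) (z : Int), z ∈ st.gs.getD j' [] →
        z ∈ (pvB_append i x st).gs.getD j' [] := by
      intro j' z hz
      by_cases hj' : j' = i
      · subst hj'; rw [hgeti]; exact List.mem_append_left _ hz
      · rw [hgetd j' hj']; exact hz
    refine ⟨⟨?_, ?_, ⟨?_, ?_⟩, ?_, ?_, ?_, ?_, ?_⟩, ?_, ?_⟩
    · rw [hA, e1, hgs]
    · rw [hA, e3, hmg, PySem.Set.add_eq_ite]
    · rw [hA, e2]
      simp [hml]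
    · rw [hA]
      intro j y
      simp only
      by_cases hj : j = i
      · subst hj
        by_cases hij : j < st.ms.length
        · rw [e2, pvGetD_set_self _ _ _ _ hij,
            pvGetD_set_self _ _ _ _ hilen]
          rw [PySem.Set.mem_add]
          simp only [List.mem_append, List.mem_singleton]
          rw [hmm j y]
        · rw [e2, List.set_eq_of_length_le (by omega),
            List.set_eq_of_length_le (by omega)]
          exact hmm j y
      · rw [e2, pvGetD_set_ne _ _ _ _ _ hj, pvGetD_set_ne _ _ _ _ _ hj]
        exact hmm j y
    · -- pvHeads
      rw [hA]
      refine ⟨by simpa using hhd.1, ?_⟩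
      intro j hj
      have hj' : j < a.1.length := by simpa using hj
      by_cases hji : j = i
      · subst hji
        rw [pvGetD_set_self _ _ _ _ hj']
        exact ⟨by simp, by rw [pvHeadD_append hne, (hhd.2 j hj').2]⟩
      · rw [pvGetD_set_ne _ _ _ _ _ hji]
        exact hhd.2 j hj'
    · -- pvCurInv
      intro i' j'
      obtain ⟨hle, hmemb⟩ := hcur i' j'
      rw [e4]
      constructor
      · by_cases hj' : j' = i
        · subst hj'; rw [hgeti]
          simp only [List.length_append, List.length_cons, List.length_nil]
          omega
        · rw [hgetd j' hj']; exact hle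
      · intro t ht
        have hsrc : ((pvB_append i x st).gs.getD j' []).getD t 0 = (st.gs.getD j' []).getD t 0 := by
          by_cases hj' : j' = i
          · subst hj'; rw [hgeti]
            exact pvGetD_append_left _ _ _ _ (by omega)
          · rw [hgetd j' hj']
        rw [hsrc]
        exact hmono i' _ (hmemb t ht)
    · -- pvRefsInv
      intro i'' hi'' v hv
      rw [e5]
      by_cases hii : i'' = i
      · subst hii
        rw [hgeti, List.drop_append_of_le_length
          (by rw [hgs]; exact List.length_pos_of_ne_nil hne)] at hv
        rcases List.mem_append.mp hv with h | h
        · exact pvRefs_mono _ _ _ _ _ (hrefs i'' (by omega) v h)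
        · rw [List.mem_singleton] at h
          subst h
          exact pvRefs_self _ _ _
      · rw [hgetd i'' hii] at hv
        exact pvRefs_mono _ _ _ _ _ (hrefs i'' (by omega) v hv)
    · -- pvRefsRange
      intro v t ht
      rw [e5] at ht
      rw [hglen]
      rcases pvRefs_range _ _ _ _ _ ht with h | h
      · exact hrr v t h
      · subst h; rw [hgs]; exact hilen
    · -- pvDirtyRange
      intro t ht
      rw [e6] at ht
      rw [hglen]
      rcases (PySem.Set.mem_update _ _ _).mp ht with h | h
      · rcases (PySem.Set.mem_add _ _ _).mp h with h2 | h2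
        · exact hdr t h2
        · subst h2; rw [hgs]; exact hilen
      · rcases pvRefs_range _ _ _ _ _ h with h2 | h2
        · exact hrr _ t h2
        · subst h2; rw [hgs]; exact hilen
    · -- pvCE
      intro t ht hdt' k hk1 hk2 j hj hhead
      have hdt : t ∉ st.dirty := fun hc => hdt' (hdm t hc)
      have hgt : (pvB_append i x st).gs.getD t [] = st.gs.getD t [] := hgetd t ht
      rw [hgt] at hk2 hhead
      have htlen : t < st.gs.length := by
        by_contra hcon
        rw [List.getD_eq_default _ _ (by omega)] at hk2
        simp at hk2
      rw [e4]
      by_cases hji : j = i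
      · subst hji
        rw [hgeti, pvHeadD_append (by rw [hgs]; exact hne)] at hhead
        exfalso
        apply hdt'
        rw [e6]
        refine (PySem.Set.mem_update _ _ _).mpr (Or.inr ?_)
        rw [hhead]
        exact pvRefs_mono _ _ _ _ _
          (hrefs t htlen _ (pvGetD_mem_drop_one _ _ hk1 hk2))
      · rw [hgetd j hji]
        rw [hgetd j hji] at hhead
        exact hce t ht hdt k hk1 hk2 j (by rw [hglen] at hj; exact hj) hhead
    · -- pvPost
      refine ⟨hgetd, ⟨[x], hgeti⟩, hdm, fun _ => by rw [hA], fun _ => Or.inl (by rw [e4]),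
        Or.inr ⟨by rw [hA], hdi⟩⟩

lemma pv_pull (groups : List (List Int)) (i j : Nat) (hi : i < groups.length) :
    ∀ (F c : Nat) (a : List (List Int) × List Int × Bool) (st : PvBSt),
      pvRC groups a st → pvCE st i →
      F + c = (st.gs.getD j []).length →
      (∀ t, t < c → (st.gs.getD j []).getD t 0 ∈ st.gs.getD i []) →
      pvRC groups (((st.gs.getD j []).drop c).foldl (pvA_fb i) a) (pvB_pull i j F st c).1 ∧
      pvCE (pvB_pull i j F st c).1 i ∧
      pvPost i a (((st.gs.getD j []).drop c).foldl (pvA_fb i) a) st (pvB_pull i j F st c).1 ∧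
      (pvB_pull i j F st c).2 = (st.gs.getD j []).length ∧
      (pvB_pull i j F st c).1.gs.getD j [] = st.gs.getD j [] ∧
      (∀ t, t < (st.gs.getD j []).length →
        (st.gs.getD j []).getD t 0 ∈ (pvB_pull i j F st c).1.gs.getD i []) := by
  intro F
  induction F with
  | zero =>
    intro c a st h hce hfc hpre
    have hc : c = (st.gs.getD j []).length := by omega
    simp only [pvB_pull]
    rw [List.drop_of_length_le (by omega)]
    refine ⟨h, hce, pvPost_refl i a st, hc, ?A, fun t ht => hpre t (by omega)⟩
    case A => trivial
  | succ F ih =>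
    intro c a st h hce hfc hpre
    have hgs := h.1
    have hmm := h.2.2.1.2
    have hilen : i < a.1.length := by
      have := h.2.2.2.1.1; omega
    have hc : c < (st.gs.getD j []).length := by omega
    set x := (st.gs.getD j []).getD c 0 with hxdef
    have hxmem : x ∈ st.gs.getD j [] := pvGetD_mem _ _ _ hc
    obtain ⟨rc1, ce1, post1⟩ := pv_fb groups i hi x a st h hce
    set st1 := if x ∈ st.ms.getD i [] then st else pvB_append i x st with hst1
    have hsrc1 : st1.gs.getD j [] = st.gs.getD j [] := by
      by_cases hmem : x ∈ st.ms.getD i []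
      · rw [hst1, if_pos hmem]
      · rw [hst1, if_neg hmem]
        by_cases hji : j = i
        · exfalso
          apply hmem
          rw [hmm i x, ← hgs, ← hji]
          exact hxmem
        · exact pvGetD_set_ne _ _ _ _ _ hji
    have hxin : x ∈ st1.gs.getD i [] := by
      by_cases hmem : x ∈ st.ms.getD i []
      · rw [hst1, if_pos hmem, hgs]
        exact (hmm i x).mp hmem
      · rw [hst1, if_neg hmem]
        have : (pvB_append i x st).gs.getD i [] = st.gs.getD i [] ++ [x] :=
          pvGetD_set_self _ _ _ _ (by rw [hgs]; exact hilen)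
        rw [this]
        simp
    obtain ⟨e, hext⟩ := post1.2.1
    have ihall := ih (c+1) (pvA_fb i a x) st1 rc1 ce1 (by rw [hsrc1]; omega)
      (by
        intro t ht
        rw [hsrc1]
        by_cases htc : t < c
        · rw [hext]
          exact List.mem_append_left _ (hpre t htc)
        · have hteq : t = c := by omega
          rw [hteq, ← hxdef]
          exact hxin)
    obtain ⟨ihrc, ihce, ihpost, ihc2, ihgsj, ihmem⟩ := ihall
    rw [hsrc1] at ihrc ihpost ihc2 ihgsj ihmem
    have hunf : pvB_pull i j (F + 1) st c = pvB_pull i j F st1 (c + 1) := by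
      simp only [pvB_pull]
      rw [if_pos hc]
    have hdrop : (st.gs.getD j []).drop c = x :: (st.gs.getD j []).drop (c + 1) := by
      rw [List.drop_eq_getElem_cons hc]
      congr 1
      rw [hxdef, List.getD_eq_getElem _ _ hc]
    rw [hunf, hdrop, List.foldl_cons]
    exact ⟨ihrc, ihce, pvPost_trans post1 ihpost, ihc2, ihgsj, ihmem⟩

lemma pv_edge (groups : List (List Int)) (i j : Nat) (hi : i < groups.length)
    (hj : j < groups.length)
    (a : List (List Int) × List Int × Bool) (st : PvBSt)
    (h : pvRC groups a st) (hce : pvCE st i) :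
    pvRC groups ((st.gs.getD j []).foldl (pvA_fb i) a) (pvB_edge i st j) ∧
    pvCE (pvB_edge i st j) i ∧
    pvPost i a ((st.gs.getD j []).foldl (pvA_fb i) a) st (pvB_edge i st j) ∧
    (i ∈ (pvB_edge i st j).dirty ∨
      (pvB_edge i st j).cur.getD (i, j) 0 = ((pvB_edge i st j).gs.getD j []).length) := by
  have hgs := h.1
  obtain ⟨hle, hpre⟩ := h.2.2.2.2.1 i j
  set c0 := st.cur.getD (i, j) 0 with hc0
  set r := pvB_pull i j ((st.gs.getD j []).length - c0) st c0 with hr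
  have hunf : pvB_edge i st j = { r.1 with cur := r.1.cur.insert (i, j) r.2 } := rfl
  -- A's scan of the whole source = identity on the pulled prefix, then the delta
  have hsplit : st.gs.getD j [] =
      (st.gs.getD j []).take c0 ++ (st.gs.getD j []).drop c0 :=
    (List.take_append_drop _ _).symm
  have htake : ((st.gs.getD j []).take c0).foldl (pvA_fb i) a = a := by
    apply pvA_foldl_fb_id
    intro z hz
    obtain ⟨t, ht, rfl⟩ := List.getElem_of_mem hz
    have ht' : t < c0 := by
      have := ht; simp at this; omega
    have htl : t < (st.gs.getD j []).length := by
      have := ht; simp at this; omega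
    have h2 := hpre t ht'
    rw [hgs] at h2
    have he : ((st.gs.getD j []).take c0)[t] = (a.1.getD j []).getD t 0 := by
      rw [← hgs, List.getD_eq_getElem _ _ htl, List.getElem_take]
    rw [he]
    exact h2
  obtain ⟨prc, pce, ppost, pc2, pgsj, pmem⟩ :=
    pv_pull groups i j hi ((st.gs.getD j []).length - c0) c0 a st h hce (by omega) hpre
  rw [← hr] at prc pce ppost pc2 pgsj pmem
  have hAfold : (st.gs.getD j []).foldl (pvA_fb i) a =
      ((st.gs.getD j []).drop c0).foldl (pvA_fb i) a := by
    conv_lhs => rw [hsplit]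
    rw [List.foldl_append, htake]
  rw [hAfold, hunf]
  have hcurnew : ∀ j' : Nat,
      ({ r.1 with cur := r.1.cur.insert (i, j) r.2 } : PvBSt).cur.getD (i, j') 0 =
        if (i, j') = (i, j) then r.2 else r.1.cur.getD (i, j') 0 := by
    intro j'
    exact PySem.Dict.getD_insert _ _ _ _ _
  refine ⟨⟨prc.1, prc.2.1, prc.2.2.1, prc.2.2.2.1, ?_, prc.2.2.2.2.2.1,
      prc.2.2.2.2.2.2.1, prc.2.2.2.2.2.2.2⟩, ?_, ?_, ?_⟩
  · -- pvCurInv with the new cursor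
    intro i' j'
    obtain ⟨hle', hpre'⟩ := prc.2.2.2.2.1 i' j'
    have hget : ({ r.1 with cur := r.1.cur.insert (i, j) r.2 } : PvBSt).cur.getD (i', j') 0 =
        if (i', j') = (i, j) then r.2 else r.1.cur.getD (i', j') 0 :=
      PySem.Dict.getD_insert _ _ _ _ _
    rw [hget]
    split_ifs with hp
    · obtain ⟨hp1, hp2⟩ := Prod.mk.injEq .. ▸ hp
      subst hp1; subst hp2
      constructor
      · rw [pc2, pgsj]
      · intro t ht
        rw [pc2] at ht
        rw [pgsj]
        exact pmem t ht
    · exact ⟨hle', hpre'⟩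
  · -- pvCE
    intro t ht hdt k hk1 hk2 j2 hj2 hhead
    have hget : ({ r.1 with cur := r.1.cur.insert (i, j) r.2 } : PvBSt).cur.getD (t, j2) 0 =
        r.1.cur.getD (t, j2) 0 :=
      PySem.Dict.getD_insert_of_ne _ _ _ (by simp [Prod.ext_iff]; intro h'; exact absurd h' ht)
    rw [hget]
    exact pce t ht hdt k hk1 hk2 j2 hj2 hhead
  · -- pvPost: the pull's post composed with the cursor write
    refine pvPost_trans ppost
      ⟨fun _ _ => rfl, ⟨[], by simp⟩, fun _ h' => h', fun h' => h', ?_, Or.inl ⟨rfl, rfl, rfl, rfl, rfl, rfl⟩⟩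
    intro j'
    rw [hcurnew j']
    split_ifs with hp
    · have hj' : j' = j := by simpa [Prod.ext_iff] using hp
      subst hj'
      refine Or.inr (Or.inl ?_)
      rw [pc2, pgsj]
    · exact Or.inl rfl
  · -- the processed pair is exhausted afterwards
    refine Or.inr ?_
    rw [hcurnew j]
    rw [if_pos rfl, pc2, pgsj]

lemma pv_pos_aux (groups : List (List Int)) (i : Nat) (hi : i < groups.length) (fa : Int) :
    ∀ (l : List Nat), (∀ j ∈ l, j < groups.length) →
    ∀ (a : List (List Int) × List Int × Bool) (st : PvBSt),
      pvRC groups a st → pvCE st i →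
      pvRC groups
        (l.foldl (fun s j =>
          let gb := s.1.getD j []
          if gb.headD 0 = fa then gb.foldl (pvA_fb i) s else s) a)
        ((l.filter (fun j => (groups.getD j []).headD 0 == fa)).foldl (pvB_edge i) st) ∧
      pvCE ((l.filter (fun j => (groups.getD j []).headD 0 == fa)).foldl (pvB_edge i) st) i ∧
      pvPost i a
        (l.foldl (fun s j =>
          let gb := s.1.getD j []
          if gb.headD 0 = fa then gb.foldl (pvA_fb i) s else s) a)
        st ((l.filter (fun j => (groups.getD j []).headD 0 == fa)).foldl (pvB_edge i) st) ∧
      (∀ j ∈ l, (groups.getD j []).headD 0 = fa →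
        (i ∈ ((l.filter (fun j => (groups.getD j []).headD 0 == fa)).foldl (pvB_edge i) st).dirty ∨
          ((l.filter (fun j => (groups.getD j []).headD 0 == fa)).foldl (pvB_edge i) st).cur.getD (i, j) 0 =
            (((l.filter (fun j => (groups.getD j []).headD 0 == fa)).foldl (pvB_edge i) st).gs.getD j []).length)) := by
  intro l
  induction l with
  | nil =>
    intro _ a st h hce
    exact ⟨h, hce, pvPost_refl i a st, by simp⟩
  | cons j t ih =>
    intro hb a st h hce
    have hjn : j < groups.length := hb j (by simp)
    have hgs := h.1
    have hhead : (a.1.getD j []).headD 0 = (groups.getD j []).headD 0 :=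
      pvHeads_headD h.2.2.2.1 j
    by_cases hp : (groups.getD j []).headD 0 = fa
    · rw [List.filter_cons_of_pos (by simpa using hp)]
      simp only [List.foldl_cons]
      obtain ⟨rc1, ce1, post1, full1⟩ := pv_edge groups i j hi hjn a st h hce
      rw [hgs] at rc1 post1
      have hstep : (if (a.1.getD j []).headD 0 = fa
            then List.foldl (pvA_fb i) a (a.1.getD j []) else a) =
          List.foldl (pvA_fb i) a (a.1.getD j []) :=
        if_pos (by rw [hhead]; exact hp)
      rw [hstep]
      obtain ⟨rc2, ce2, post2, full2⟩ := ih (fun j' hj' => hb j' (by simp [hj']))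
        ((a.1.getD j []).foldl (pvA_fb i) a) (pvB_edge i st j) rc1 ce1
      refine ⟨rc2, ce2, pvPost_trans post1 post2, ?_⟩
      intro j' hj' hp'
      rcases List.mem_cons.mp hj' with hj1 | hj1
      · subst hj1
        exact pvFull_persist post2 full1
      · exact full2 j' hj1 hp'
    · rw [List.filter_cons_of_neg (by simpa using hp)]
      have hstep : (if (a.1.getD j []).headD 0 = fa
            then List.foldl (pvA_fb i) a (a.1.getD j []) else a) = a :=
        if_neg (by rw [hhead]; exact hp)
      simp only [List.foldl_cons]
      rw [hstep]
      obtain ⟨rc2, ce2, post2, full2⟩ := ih (fun j' hj' => hb j' (by simp [hj'])) a st h hce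
      refine ⟨rc2, ce2, post2, ?_⟩
      intro j' hj' hp'
      rcases List.mem_cons.mp hj' with hj1 | hj1
      · subst hj1; exact absurd hp' hp
      · exact full2 j' hj1 hp'

lemma pv_pos (groups : List (List Int)) (i : Nat) (hi : i < groups.length) (k : Nat)
    (a : List (List Int) × List Int × Bool) (st : PvBSt)
    (h : pvRC groups a st) (hce : pvCE st i) :
    pvRC groups (pvA_fa groups.length i a ((st.gs.getD i []).getD k 0))
      (pvB_pos (pvB_idx groups) i st k) ∧
    pvCE (pvB_pos (pvB_idx groups) i st k) i ∧
    pvPost i a (pvA_fa groups.length i a ((st.gs.getD i []).getD k 0))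
      st (pvB_pos (pvB_idx groups) i st k) ∧
    (∀ j, j < groups.length →
      (groups.getD j []).headD 0 = (st.gs.getD i []).getD k 0 →
      (i ∈ (pvB_pos (pvB_idx groups) i st k).dirty ∨
        (pvB_pos (pvB_idx groups) i st k).cur.getD (i, j) 0 =
          ((pvB_pos (pvB_idx groups) i st k).gs.getD j []).length)) := by
  have hunf : pvB_pos (pvB_idx groups) i st k =
      (((List.range groups.length).filter
        (fun j => (groups.getD j []).headD 0 == (st.gs.getD i []).getD k 0)).foldl
          (pvB_edge i) st) := by
    unfold pvB_pos
    rw [pvB_idx_getD]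
  have haux := pv_pos_aux groups i hi ((st.gs.getD i []).getD k 0)
    (List.range groups.length) (fun j hj => List.mem_range.mp hj) a st h hce
  obtain ⟨rc, ce, post, full⟩ := haux
  rw [hunf]
  exact ⟨rc, ce, post, fun j hj hp => full j (List.mem_range.mpr hj) hp⟩

lemma pv_skip (groups : List (List Int)) (i : Nat) (hi : i < groups.length)
    (a : List (List Int) × List Int × Bool) (st : PvBSt)
    (h : pvRC groups a st) (hcl : pvClean st i) (hd : i ∉ st.dirty) :
    pvA_group groups.length a i = a := by
  have hgs := h.1
  have hcur := h.2.2.2.2.1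
  simp only [pvClean] at hcl
  simp only [pvCurInv] at hcur
  rw [hgs] at hcl hcur
  unfold pvA_group
  apply pvFoldl_id
  intro fa hfa
  unfold pvA_fa
  apply pvFoldl_id
  intro j hj
  simp only
  split_ifs with ht
  · apply pvA_foldl_fb_id
    intro z hz
    obtain ⟨k0, hk0, hke⟩ := List.getElem_of_mem hfa
    have hk1 : 1 + k0 < (a.1.getD i []).length := by
      have := hk0; rw [List.length_drop] at this; omega
    have hfa' : (a.1.getD i []).getD (1 + k0) 0 = fa := by
      rw [List.getD_eq_getElem _ _ hk1, ← hke, List.getElem_drop]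
    have hjlen : j < a.1.length := by
      have h1 := List.mem_range.mp hj
      have h2 := h.2.2.2.1.1
      omega
    have hfull := hcl hd (1 + k0) (by omega) hk1 j hjlen (by rw [hfa']; exact ht)
    obtain ⟨t, htl, hze⟩ := List.getElem_of_mem hz
    have hmem := (hcur i j).2 t (by rw [hfull]; exact htl)
    rw [List.getD_eq_getElem _ _ htl] at hmem
    rw [← hze]
    exact hmem
  · rfl

lemma pvMem_range_drop {m k : Nat} (h : k ∈ (List.range m).drop 1) : 1 ≤ k ∧ k < m := by
  obtain ⟨t, ht, rfl⟩ := List.getElem_of_mem h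
  have hl := ht
  rw [List.length_drop, List.length_range] at hl
  rw [List.getElem_drop, List.getElem_range]
  omega

lemma pvMem_range_drop' {m k : Nat} (h1 : 1 ≤ k) (h2 : k < m) :
    k ∈ (List.range m).drop 1 := by
  refine List.mem_iff_getElem.mpr ⟨k - 1, by simp; omega, ?_⟩
  rw [List.getElem_drop, List.getElem_range]
  omega

lemma pv_proc_aux (groups : List (List Int)) (i : Nat) (hi : i < groups.length)
    (g0 : List Int) :
    ∀ (ks : List Nat), (∀ k ∈ ks, 1 ≤ k ∧ k < g0.length) →
    ∀ (a : List (List Int) × List Int × Bool) (st : PvBSt),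
      pvRC groups a st → pvCE st i → (∃ e, st.gs.getD i [] = g0 ++ e) →
      pvRC groups (ks.foldl (fun s k => pvA_fa groups.length i s (g0.getD k 0)) a)
        (ks.foldl (pvB_pos (pvB_idx groups) i) st) ∧
      pvCE (ks.foldl (pvB_pos (pvB_idx groups) i) st) i ∧
      pvPost i a (ks.foldl (fun s k => pvA_fa groups.length i s (g0.getD k 0)) a)
        st (ks.foldl (pvB_pos (pvB_idx groups) i) st) ∧
      (∀ k ∈ ks, ∀ j, j < groups.length →
        (groups.getD j []).headD 0 = g0.getD k 0 →
        (i ∈ (ks.foldl (pvB_pos (pvB_idx groups) i) st).dirty ∨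
          (ks.foldl (pvB_pos (pvB_idx groups) i) st).cur.getD (i, j) 0 =
            ((ks.foldl (pvB_pos (pvB_idx groups) i) st).gs.getD j []).length)) := by
  intro ks
  induction ks with
  | nil =>
    intro _ a st h hce _
    exact ⟨h, hce, pvPost_refl i a st, by simp⟩
  | cons k ks ih =>
    intro hb a st h hce hext
    obtain ⟨e, he⟩ := hext
    have hkb := hb k (by simp)
    have hval : (st.gs.getD i []).getD k 0 = g0.getD k 0 := by
      rw [he]
      exact pvGetD_append_left _ _ _ _ (by omega)
    obtain ⟨rc1, ce1, post1, full1⟩ := pv_pos groups i hi k a st h hce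
    rw [hval] at rc1 post1 full1
    simp only [List.foldl_cons]
    obtain ⟨rc2, ce2, post2, full2⟩ := ih (fun k' hk' => hb k' (by simp [hk']))
      (pvA_fa groups.length i a (g0.getD k 0)) (pvB_pos (pvB_idx groups) i st k)
      rc1 ce1
      (by
        obtain ⟨e', he'⟩ := post1.2.1
        exact ⟨e ++ e', by rw [he', he, List.append_assoc]⟩)
    refine ⟨rc2, ce2, pvPost_trans post1 post2, ?_⟩
    intro k' hk' j hj hhead
    rcases List.mem_cons.mp hk' with hk1 | hk1
    · subst hk1
      exact pvFull_persist post2 (full1 j hj hhead)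
    · exact full2 k' hk1 j hj hhead

lemma pv_proc (groups : List (List Int)) (i : Nat) (hi : i < groups.length)
    (a : List (List Int) × List Int × Bool) (st : PvBSt)
    (h : pvRC groups a st) (hca : pvCleanAll st) :
    pvRC groups (pvA_group groups.length a i) (pvB_proc (pvB_idx groups) st i) ∧
    pvCleanAll (pvB_proc (pvB_idx groups) st i) ∧
    (∀ t ∈ st.dirty, t ≠ i → t ∈ (pvB_proc (pvB_idx groups) st i).dirty) ∧
    (a.2.2 = true → (pvA_group groups.length a i).2.2 = true) ∧
    (((pvA_group groups.length a i) = a ∧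
        (pvB_proc (pvB_idx groups) st i).dirty = PySem.Set.discard st.dirty i) ∨
      ((pvA_group groups.length a i).2.2 = true ∧
        i ∈ (pvB_proc (pvB_idx groups) st i).dirty)) := by
  have hgs := h.1
  have hlen : a.1.length = groups.length := h.2.2.2.1.1
  set st1 : PvBSt := { st with dirty := PySem.Set.discard st.dirty i } with hst1
  have hrc1 : pvRC groups a st1 := by
    refine ⟨h.1, h.2.1, h.2.2.1, h.2.2.2.1, h.2.2.2.2.1, h.2.2.2.2.2.1,
      h.2.2.2.2.2.2.1, ?_⟩
    intro t ht
    exact h.2.2.2.2.2.2.2 t ((PySem.Set.mem_discard _ _ _).mp ht).1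
  have hce1 : pvCE st1 i := by
    intro t ht hdt k hk1 hk2 j hj hhead
    have hdt' : t ∉ st.dirty := by
      intro hc
      exact hdt ((PySem.Set.mem_discard _ _ _).mpr ⟨hc, ht⟩)
    exact hca t hdt' k hk1 hk2 j hj hhead
  set g0 : List Int := a.1.getD i [] with hg0
  have hBus : pvB_proc (pvB_idx groups) st i =
      ((List.range g0.length).drop 1).foldl (pvB_pos (pvB_idx groups) i) st1 := by
    unfold pvB_proc
    rw [← hst1, hgs, ← hg0]
  have hAus : pvA_group groups.length a i =
      ((List.range g0.length).drop 1).foldl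
        (fun s k => pvA_fa groups.length i s (g0.getD k 0)) a := by
    unfold pvA_group
    rw [← hg0, pvDrop_one_eq_map g0, List.foldl_map]
  obtain ⟨rc, ce, post, full⟩ := pv_proc_aux groups i hi g0
    ((List.range g0.length).drop 1) (fun k hk => pvMem_range_drop hk)
    a st1 hrc1 hce1 ⟨[], by rw [hgs, ← hg0]; simp⟩
  rw [hBus, hAus]
  set out := ((List.range g0.length).drop 1).foldl (pvB_pos (pvB_idx groups) i) st1 with hout
  set aout := ((List.range g0.length).drop 1).foldl
    (fun s k => pvA_fa groups.length i s (g0.getD k 0)) a with haout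
  refine ⟨rc, ?_, ?_, post.2.2.2.1, ?_⟩
  · -- pvCleanAll
    intro t
    by_cases hti : t = i
    · subst hti
      intro hdt k hk1 hk2 j hj hhead
      rcases post.2.2.2.2.2 with ⟨hg, hm, hmg', hrf, hdy, ha⟩ | ⟨hf, hd⟩
      · have hgi : out.gs.getD t [] = g0 := by rw [hg, hgs, ← hg0]
        rw [hgi] at hk2 hhead
        have hjn : j < groups.length := by
          have : out.gs.length = groups.length := by
            rw [rc.1]; exact rc.2.2.2.1.1
          omega
        have hohead : (out.gs.getD j []).headD 0 = (groups.getD j []).headD 0 := by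
          have := pvHeads_headD rc.2.2.2.1 j
          rw [← rc.1] at this
          exact this
        rcases full k (pvMem_range_drop' hk1 hk2) j hjn
            (by rw [← hohead]; exact hhead) with hdy' | hfull
        · exact absurd hdy' hdt
        · exact hfull
      · exact absurd hd hdt
    · intro hdt k hk1 hk2 j hj hhead
      exact ce t hti hdt k hk1 hk2 j hj hhead
  · -- dirty preservation for t ≠ i
    intro t ht hti
    refine post.2.2.1 t ?_
    exact (PySem.Set.mem_discard _ _ _).mpr ⟨ht, hti⟩
  · rcases post.2.2.2.2.2 with ⟨hg, hm, hmg', hrf, hdy, ha⟩ | ⟨hf, hd⟩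
    · exact Or.inl ⟨ha, hdy⟩
    · exact Or.inr ⟨hf, hd⟩

lemma pv_sweep_aux (groups : List (List Int)) :
    ∀ (ks : List Nat), ks.Nodup → (∀ t ∈ ks, t < groups.length) →
    ∀ (a : List (List Int) × List Int × Bool) (st : PvBSt),
      pvRC groups a st → pvCleanAll st →
      (a.2.2 = true → ∃ t, t ∈ st.dirty ∧ t ∉ ks) →
      (a.2.2 = false → ∀ t ∈ st.dirty, t ∈ ks) →
      pvRC groups (ks.foldl (pvA_group groups.length) a)
        (ks.foldl (fun s i => if i ∈ s.dirty then pvB_proc (pvB_idx groups) s i else s) st) ∧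
      pvCleanAll (ks.foldl (fun s i => if i ∈ s.dirty then pvB_proc (pvB_idx groups) s i else s) st) ∧
      ((ks.foldl (pvA_group groups.length) a).2.2 = true →
        (ks.foldl (fun s i => if i ∈ s.dirty then pvB_proc (pvB_idx groups) s i else s) st).dirty ≠ []) ∧
      ((ks.foldl (pvA_group groups.length) a).2.2 = false →
        (ks.foldl (fun s i => if i ∈ s.dirty then pvB_proc (pvB_idx groups) s i else s) st).dirty = []) := by
  intro ks
  induction ks with
  | nil =>
    intro _ _ a st h hca hw1 hw2
    refine ⟨h, hca, ?_, ?_⟩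
    · intro hf
      obtain ⟨t, htd, _⟩ := hw1 hf
      exact List.ne_nil_of_mem htd
    · intro hf
      have := hw2 hf
      exact List.eq_nil_iff_forall_not_mem.mpr (fun t ht => by simpa using this t ht)
  | cons i ks ih =>
    intro hnd hb a st h hca hw1 hw2
    have hin : i < groups.length := hb i (by simp)
    obtain ⟨hik, hnd'⟩ := List.nodup_cons.mp hnd
    simp only [List.foldl_cons]
    by_cases hdi : i ∈ st.dirty
    · rw [if_pos hdi]
      obtain ⟨rc1, ca1, dpre, fmono, ncases⟩ := pv_proc groups i hin a st h hca
      refine ih hnd' (fun t ht => hb t (by simp [ht])) _ _ rc1 ca1 ?_ ?_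
      · intro hf1
        by_cases haf : a.2.2 = true
        · obtain ⟨t, htd, htk⟩ := hw1 haf
          have hti : t ≠ i := fun hc => htk (by simp [hc])
          exact ⟨t, dpre t htd hti, fun hc => htk (by simp [hc])⟩
        · rcases ncases with ⟨ha, _⟩ | ⟨_, hd⟩
          · rw [ha] at hf1
            exact absurd hf1 haf
          · exact ⟨i, hd, hik⟩
      · intro hf1
        have haf : a.2.2 = false := by
          by_contra hc
          exact absurd (fmono (by simpa using hc)) (by simp [hf1])
        rcases ncases with ⟨_, hdy⟩ | ⟨hf, _⟩
        · intro t ht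
          rw [hdy] at ht
          obtain ⟨ht1, ht2⟩ := (PySem.Set.mem_discard _ _ _).mp ht
          have := hw2 haf t ht1
          simp at this
          tauto
        · rw [hf] at hf1
          simp at hf1
    · rw [if_neg hdi]
      have hskip : pvA_group groups.length a i = a :=
        pv_skip groups i hin a st h (hca i) hdi
      rw [hskip]
      refine ih hnd' (fun t ht => hb t (by simp [ht])) a st h hca ?_ ?_
      · intro hf
        obtain ⟨t, htd, htk⟩ := hw1 hf
        exact ⟨t, htd, fun hc => htk (by simp [hc])⟩
      · intro hf t ht
        have := hw2 hf t ht
        rcases List.mem_cons.mp this with hc | hc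
        · exact absurd (hc ▸ ht) hdi
        · exact hc

lemma pv_loop (groups : List (List Int)) :
    ∀ (F : Nat) (gs : List (List Int)) (mh : List Int) (st : PvBSt),
      pvRC groups (gs, mh, false) st → pvCleanAll st →
      (pvB_loop (pvB_idx groups) groups.length F st).gs = (pvA_loop groups.length F gs mh).1 ∧
      (pvB_loop (pvB_idx groups) groups.length F st).mg = (pvA_loop groups.length F gs mh).2 := by
  intro F
  induction F with
  | zero =>
    intro gs mh st h _
    exact ⟨h.1, h.2.1⟩
  | succ F ih =>
    intro gs mh st h hca
    have hdr : ∀ t ∈ st.dirty, t < groups.length := by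
      intro t ht
      have h1 := h.2.2.2.2.2.2.2 t ht
      have h2 : st.gs.length = groups.length := by
        rw [h.1]; exact h.2.2.2.1.1
      omega
    simp only [pvA_loop, pvB_loop]
    by_cases hemp : st.dirty.isEmpty
    · rw [if_pos hemp]
      have hdnil : st.dirty = [] := by simpa using hemp
      have hpass : pvA_pass groups.length gs mh = (gs, mh, false) := by
        unfold pvA_pass
        apply pvFoldl_id
        intro x hx
        exact pv_skip groups x (List.mem_range.mp hx) (gs, mh, false) st h (hca x)
          (by rw [hdnil]; simp)
      rw [hpass]
      exact ⟨h.1, h.2.1⟩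
    · rw [if_neg hemp]
      obtain ⟨rc', ca', hw1', hw2'⟩ := pv_sweep_aux groups (List.range groups.length)
        (List.nodup_range) (fun t ht => List.mem_range.mp ht) (gs, mh, false) st h hca
        (by intro hc; simp at hc) (fun _ t ht => List.mem_range.mpr (hdr t ht))
      have hsw : pvB_sweep (pvB_idx groups) groups.length st =
          (List.range groups.length).foldl
            (fun s i => if i ∈ s.dirty then pvB_proc (pvB_idx groups) s i else s) st := rfl
      have hps : pvA_pass groups.length gs mh =
          (List.range groups.length).foldl (pvA_group groups.length) (gs, mh, false) := rfl
      rw [hsw, hps]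
      set a' := (List.range groups.length).foldl (pvA_group groups.length) (gs, mh, false) with ha'
      set st' := (List.range groups.length).foldl
        (fun s i => if i ∈ s.dirty then pvB_proc (pvB_idx groups) s i else s) st with hst'
      by_cases hflag : a'.2.2 = true
      · rw [if_pos hflag]
        have rc'' : pvRC groups (a'.1, a'.2.1, false) st' :=
          ⟨rc'.1, rc'.2.1, rc'.2.2.1, rc'.2.2.2.1, rc'.2.2.2.2.1, rc'.2.2.2.2.2.1,
            rc'.2.2.2.2.2.2.1, rc'.2.2.2.2.2.2.2⟩
        exact ih a'.1 a'.2.1 st' rc'' ca'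
      · rw [if_neg hflag]
        have hdnil' : st'.dirty = [] := hw2' (by simpa using hflag)
        have hBid : pvB_loop (pvB_idx groups) groups.length F st' = st' := by
          cases F with
          | zero => rfl
          | succ F => simp only [pvB_loop]; rw [if_pos (by rw [hdnil']; rfl)]
        rw [hBid]
        exact ⟨rc'.1, rc'.2.1⟩

lemma pv_refs0_inner_mono (l : List Int) (i : Nat) :
    ∀ (d : PySem.Dict Int (PySem.Set Nat)) (v : Int) (t : Nat), t ∈ d.getD v [] →
      t ∈ (l.foldl (fun d v => d.modify v [] (fun s => PySem.Set.add s i)) d).getD v [] := by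
  induction l with
  | nil => intro d v t ht; exact ht
  | cons w l ih =>
    intro d v t ht
    rw [List.foldl_cons]
    exact ih _ v t (pvRefs_mono _ _ _ _ _ ht)

lemma pv_refs0_inner_self (l : List Int) (i : Nat) :
    ∀ (d : PySem.Dict Int (PySem.Set Nat)), ∀ v ∈ l,
      i ∈ (l.foldl (fun d v => d.modify v [] (fun s => PySem.Set.add s i)) d).getD v [] := by
  induction l with
  | nil => intro d v hv; simp at hv
  | cons w l ih =>
    intro d v hv
    rw [List.foldl_cons]
    rcases List.mem_cons.mp hv with hv1 | hv1
    · subst hv1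
      exact pv_refs0_inner_mono l i _ v i (pvRefs_self _ _ _)
    · exact ih _ v hv1

lemma pv_refs0_outer_mono (groups : List (List Int)) :
    ∀ (ks : List Nat) (d : PySem.Dict Int (PySem.Set Nat)) (v : Int) (t : Nat),
      t ∈ d.getD v [] →
      t ∈ (ks.foldl (fun d i => ((groups.getD i []).drop 1).foldl
        (fun d v => d.modify v [] (fun s => PySem.Set.add s i)) d) d).getD v [] := by
  intro ks
  induction ks with
  | nil => intro d v t ht; exact ht
  | cons k ks ih =>
    intro d v t ht
    rw [List.foldl_cons]
    exact ih _ v t (pv_refs0_inner_mono _ _ _ v t ht)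

lemma pv_refs0_mem (groups : List (List Int)) :
    ∀ (ks : List Nat) (d : PySem.Dict Int (PySem.Set Nat)), ∀ i ∈ ks,
      ∀ v ∈ (groups.getD i []).drop 1,
      i ∈ (ks.foldl (fun d i => ((groups.getD i []).drop 1).foldl
        (fun d v => d.modify v [] (fun s => PySem.Set.add s i)) d) d).getD v [] := by
  intro ks
  induction ks with
  | nil => intro d i hi; simp at hi
  | cons k ks ih =>
    intro d i hi v hv
    rw [List.foldl_cons]
    rcases List.mem_cons.mp hi with hi1 | hi1
    · subst hi1
      exact pv_refs0_outer_mono groups ks _ v i (pv_refs0_inner_self _ _ _ v hv)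
    · exact ih _ i hi1 v hv

lemma pv_refs0_range (groups : List (List Int)) :
    ∀ (ks : List Nat), (∀ k ∈ ks, k < groups.length) →
    ∀ (d : PySem.Dict Int (PySem.Set Nat)),
      (∀ (v : Int) (t : Nat), t ∈ d.getD v [] → t < groups.length) →
      ∀ (v : Int) (t : Nat),
        t ∈ (ks.foldl (fun d i => ((groups.getD i []).drop 1).foldl
          (fun d v => d.modify v [] (fun s => PySem.Set.add s i)) d) d).getD v [] →
        t < groups.length := by
  intro ks
  induction ks with
  | nil => intro _ d hd v t ht; exact hd v t ht
  | cons k ks ih =>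
    intro hb d hd v t ht
    rw [List.foldl_cons] at ht
    refine ih (fun k' hk' => hb k' (by simp [hk'])) _ ?_ v t ht
    clear ht
    have hk : k < groups.length := hb k (by simp)
    -- the inner fold keeps the range invariant
    generalize (groups.getD k []).drop 1 = l
    induction l generalizing d with
    | nil => exact hd
    | cons w l ihl =>
      intro v' t' ht'
      rw [List.foldl_cons] at ht'
      refine ihl _ ?_ v' t' ht'
      intro v'' t'' ht''
      rcases pvRefs_range _ _ _ _ _ ht'' with hc | hc
      · exact hd v'' t'' hc
      · omega

-- ===== VERDICT (by name: the statement is the Claim_ definition above) =====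
theorem merge_connected_subgroups_py_spec : Claim_equal_merge_connected_subgroups_py := by
  intro groups _ hpre
  unfold Spec_merge_connected_subgroups_py
  simp only [merge_connected_subgroups_py, merge_connected_subgroups_py_alt]
  set st0 : PvBSt :=
    { gs := groups, ms := groups.map PySem.Set.ofList, mg := PySem.Set.empty,
      cur := PySem.Dict.empty, refs := pvB_refs0 groups,
      dirty := PySem.Set.ofList (List.range groups.length) } with hst0
  have hrc0 : pvRC groups (groups, [], false) st0 := by
    rw [hst0]
    refine ⟨rfl, rfl, ⟨by simp, ?_⟩, ⟨rfl, ?_⟩, ?_, ?_, ?_, ?_⟩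
    · intro j x
      by_cases hj : j < groups.length
      · rw [List.getD_eq_getElem _ _ (by simpa using hj), List.getD_eq_getElem _ _ hj]
        simp [PySem.Set.mem_ofList]
      · rw [List.getD_eq_default _ _ (by simpa using not_lt.mp hj),
          List.getD_eq_default _ _ (not_lt.mp hj)]
    · intro j hj
      refine ⟨?_, rfl⟩
      rw [List.getD_eq_getElem _ _ hj]
      exact hpre _ (List.getElem_mem hj)
    · intro i j
      constructor
      · simp [PySem.Dict.getD_empty]
      · intro t ht
        simp [PySem.Dict.getD_empty] at ht
    · intro i hi v hv
      exact pv_refs0_mem groups (List.range groups.length) PySem.Dict.empty i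
        (List.mem_range.mpr (by simpa using hi)) v hv
    · intro v t ht
      have := pv_refs0_range groups (List.range groups.length)
        (fun k hk => List.mem_range.mp hk) PySem.Dict.empty
        (by intro v' t' ht'; rw [PySem.Dict.getD_empty] at ht'; simp at ht') v t ht
      simpa using this
    · intro t ht
      have := List.mem_range.mp ((PySem.Set.mem_ofList _ _).mp ht)
      simpa using this
  have hca0 : pvCleanAll st0 := by
    rw [hst0]
    intro t hdt k hk1 hk2 j hj hhead
    exfalso
    apply hdt
    have htlen : t < groups.length := by
      by_contra hcon
      rw [List.getD_eq_default _ _ (by simpa using hcon : groups.length ≤ t)] at hk2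
      simp at hk2
    exact (PySem.Set.mem_ofList _ _).mpr (List.mem_range.mpr htlen)
  obtain ⟨hg, hmg⟩ := pv_loop groups (groups.length * groups.flatten.length + 1)
    groups [] st0 hrc0 hca0
  simp only [hg, hmg]
  rw [PySem.List.foldl_append_ite_eq_filter]
  simp [decide_not]
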